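-- pv_equiv track=rewrite | github.com/GithuBarry/DocIE-Probing | Probing/Code/getY_labels.py | generate_pairs
-- ===== SOURCE A (Python) =====
-- def generate_pairs(lists):
--     """Generate all possible pairs from lists of items."""
--     pairs = set()
--     for i in range(len(lists)):
--         for j in range(i + 1, len(lists)):
--             for elem1 in lists[i]:
--                 for elem2 in lists[j]:
--                     if elem1 != elem2:
--                         l = sorted([elem1, elem2])
--                         pairs.add((l[0], l[1]))
--     return pairs
-- ===== SOURCE B (Python) =====
-- def generate_pairs(lists):
--     """Generate all possible pairs from lists of items."""
--     if not lists:
--         return set()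
--     head, rest = lists[0], lists[1:]
--     mine = {(x, y) if x < y else (y, x)
--             for other in rest for x in head for y in other if x != y}
--     return mine | generate_pairs(rest)
-- ===== Notes on version B (the rewrite author's own statement) =====
-- stated objective: simpler
-- what changed: Recursion on the list of lists (head crossed with each later list via one set comprehension, then union with the recursive result) replaces the four nested index loops with range/sorted.
import Mathlib
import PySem

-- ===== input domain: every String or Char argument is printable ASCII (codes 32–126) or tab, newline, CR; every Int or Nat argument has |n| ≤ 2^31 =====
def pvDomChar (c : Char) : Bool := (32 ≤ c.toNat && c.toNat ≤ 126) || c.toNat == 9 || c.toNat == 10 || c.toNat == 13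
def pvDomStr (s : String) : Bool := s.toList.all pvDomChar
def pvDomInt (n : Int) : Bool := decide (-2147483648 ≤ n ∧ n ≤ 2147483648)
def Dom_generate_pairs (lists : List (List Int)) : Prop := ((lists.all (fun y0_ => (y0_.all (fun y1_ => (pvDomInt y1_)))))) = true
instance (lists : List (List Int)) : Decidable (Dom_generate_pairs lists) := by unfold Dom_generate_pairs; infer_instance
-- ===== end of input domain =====

-- B replaces the four nested index loops by structural recursion on the list of lists
-- (head crossed with each later list via a set comprehension, then set-union with the
-- recursive result) — objective: simpler.


-- ===== PORT A =====
def generate_pairs (lists : List (List Int)) : List (Int × Int) :=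
  (PySem.List.pyRange 0 (lists.length : Int) 1).foldl (fun pairs i =>
    (PySem.List.pyRange (i + 1) (lists.length : Int) 1).foldl (fun pairs j =>
      (PySem.List.pyGetD lists i []).foldl (fun pairs elem1 =>
        (PySem.List.pyGetD lists j []).foldl (fun pairs elem2 =>
          if elem1 ≠ elem2 then
            -- l = sorted([elem1, elem2]); pairs.add((l[0], l[1])): l always has the two
            -- elements, so l[0]/l[1] never raise; the match reads them off.
            match PySem.List.sorted [elem1, elem2] (fun z => z) false with
            | [a, b] => PySem.Set.add pairs (a, b)
            | _ => pairs
          else pairs) pairs) pairs) pairs) PySem.Set.empty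

-- ===== PORT B =====
def generate_pairs_alt : List (List Int) → List (Int × Int)
  | [] => PySem.Set.empty
  | head :: rest =>
    let mine : PySem.Set (Int × Int) :=
      rest.foldl (fun s other =>
        head.foldl (fun s x =>
          other.foldl (fun s y =>
            if x ≠ y then PySem.Set.add s (if x < y then (x, y) else (y, x)) else s) s) s)
        PySem.Set.empty
    PySem.Set.union mine (generate_pairs_alt rest)

-- ===== PRECONDITION & SPEC =====
def Spec_generate_pairs (lists : List (List Int)) (out : List (Int × Int)) : Prop := out = generate_pairs_alt lists
instance (lists : List (List Int)) (out : List (Int × Int)) : Decidable (Spec_generate_pairs lists out) := by unfold Spec_generate_pairs; infer_instance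

-- ===== CLAIM (what is proved, stated in full; the proofs are below) =====
def Claim_equal_generate_pairs : Prop := ∀ (lists : List (List Int)), Dom_generate_pairs lists → Spec_generate_pairs lists (generate_pairs lists)

-- ===== LEMMAS AND PROOFS =====

-- The ordered pair both programs insert for x ≠ y.
def gpCand (x y : Int) : Int × Int := if x < y then (x, y) else (y, x)

-- All pairs produced by crossing one list with one later list, in traversal order.
def gpCross (hd ot : List Int) : List (Int × Int) :=
  hd.flatMap (fun x => (ot.filter (fun y => decide (x ≠ y))).map (gpCand x))

-- The full candidate sequence of A's traversal (i, then j > i, then elements).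
def gpSeq : List (List Int) → List (Int × Int)
  | [] => []
  | h :: t => t.flatMap (gpCross h) ++ gpSeq t

theorem gp_sorted_pair (x y : Int) :
    PySem.List.sorted [x, y] (fun z => z) false = if x ≤ y then [x, y] else [y, x] := by
  simp [PySem.List.sorted_eq_foldl_insertBy, PySem.List.insertBy]
  split_ifs <;> simp_all
  omega

-- A's innermost loop (over elem2) updates the set with the candidate pairs for x.
theorem gpA_inner (x : Int) (ys : List Int) (s : PySem.Set (Int × Int)) :
    ys.foldl (fun s y =>
        if x ≠ y then
          match PySem.List.sorted [x, y] (fun z => z) false with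
          | [a, b] => PySem.Set.add s (a, b)
          | _ => s
        else s) s
      = PySem.Set.update s ((ys.filter (fun y => decide (x ≠ y))).map (gpCand x)) := by
  rw [PySem.List.foldl_congr_mem ys _ (fun s y => if x ≠ y then PySem.Set.add s (gpCand x y) else s) s ?_]
  · rw [PySem.List.foldl_ite_eq_foldl_filter (fun y => x ≠ y) (fun s y => PySem.Set.add s (gpCand x y)),
      ← PySem.Set.update_map_eq_foldl_add]
  · intro s y _
    by_cases h : x = y
    · simp [h]
    · rw [gp_sorted_pair]
      by_cases hlt : x < y
      · have : x ≤ y := le_of_lt hlt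
        simp [h, hlt, this, gpCand]
      · have : ¬ x ≤ y := by omega
        simp [h, hlt, this, gpCand]

-- B's innermost loop is the same update.
theorem gpB_inner (x : Int) (ys : List Int) (s : PySem.Set (Int × Int)) :
    ys.foldl (fun s y =>
        if x ≠ y then PySem.Set.add s (if x < y then (x, y) else (y, x)) else s) s
      = PySem.Set.update s ((ys.filter (fun y => decide (x ≠ y))).map (gpCand x)) := by
  show ys.foldl (fun s y => if x ≠ y then PySem.Set.add s (gpCand x y) else s) s = _
  rw [PySem.List.foldl_ite_eq_foldl_filter (fun y => x ≠ y) (fun s y => PySem.Set.add s (gpCand x y)),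
    ← PySem.Set.update_map_eq_foldl_add]

-- A loop of whole-list updates is one update with the concatenation.
theorem gp_foldl_update {β : Type} (g : β → List (Int × Int)) (l : List β) (s : PySem.Set (Int × Int)) :
    l.foldl (fun s b => PySem.Set.update s (g b)) s = PySem.Set.update s (l.flatMap g) := by
  induction l generalizing s with
  | nil => simp [PySem.Set.update_nil]
  | cons b t ih => rw [List.foldl_cons, ih, List.flatMap_cons, PySem.Set.update_append]

-- The two-deep loop crossing hd with ot (shared by both programs after gpA_inner/gpB_inner).
theorem gp_cross_loop (hd ot : List Int) (s : PySem.Set (Int × Int)) :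
    hd.foldl (fun s x =>
        ot.foldl (fun s y =>
          if x ≠ y then PySem.Set.add s (if x < y then (x, y) else (y, x)) else s) s) s
      = PySem.Set.update s (gpCross hd ot) := by
  rw [PySem.List.foldl_congr_mem hd _
      (fun s x => PySem.Set.update s ((ot.filter (fun y => decide (x ≠ y))).map (gpCand x))) s
      (fun s x _ => gpB_inner x ot s)]
  rw [gp_foldl_update]
  rfl

theorem gp_update_ofList (s : PySem.Set (Int × Int)) (l : List (Int × Int)) :
    PySem.Set.update s (PySem.Set.ofList l) = PySem.Set.update s l := by
  rw [PySem.Set.update_eq_append_filter, PySem.Set.update_eq_append_filter, PySem.Set.ofList_ofList]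

-- A's j-loop from index b pairs lists[i] with every later list.
theorem gpA_jloop (L : List (List Int)) (x : List Int) (k : Nat) :
    ∀ (b : Nat) (s : PySem.Set (Int × Int)), b + k = L.length →
    (PySem.List.pyRange (b : Int) (L.length : Int) 1).foldl (fun s j =>
        x.foldl (fun s elem1 =>
          (PySem.List.pyGetD L j []).foldl (fun s elem2 =>
            if elem1 ≠ elem2 then
              match PySem.List.sorted [elem1, elem2] (fun z => z) false with
              | [a, b] => PySem.Set.add s (a, b)
              | _ => s
            else s) s) s) s
      = PySem.Set.update s ((L.drop b).flatMap (gpCross x)) := by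
  induction k with
  | zero =>
    intro b s hb
    rw [PySem.List.pyRange_one_eq_nil (by omega)]
    simp [List.drop_of_length_le (by omega : L.length ≤ b), PySem.Set.update_nil]
  | succ k ih =>
    intro b s hb
    have hblt : b < L.length := by omega
    rw [PySem.List.pyRange_one_cons (by exact_mod_cast hblt), List.foldl_cons]
    have hget : PySem.List.pyGetD L (b : Int) [] = L[b] := by
      rw [PySem.List.pyGetD_natCast, List.getD_eq_getElem L [] hblt]
    rw [hget]
    have hbody : ∀ (s : PySem.Set (Int × Int)),
        x.foldl (fun s elem1 =>
          (L[b]).foldl (fun s elem2 =>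
            if elem1 ≠ elem2 then
              match PySem.List.sorted [elem1, elem2] (fun z => z) false with
              | [a, b] => PySem.Set.add s (a, b)
              | _ => s
            else s) s) s = PySem.Set.update s (gpCross x L[b]) := by
      intro s
      rw [PySem.List.foldl_congr_mem x _
          (fun s e1 => PySem.Set.update s (((L[b]).filter (fun y => decide (e1 ≠ y))).map (gpCand e1))) s
          (fun s e1 _ => gpA_inner e1 L[b] s)]
      rw [gp_foldl_update]
      rfl
    rw [hbody]
    have hcast : (b : Int) + 1 = ((b + 1 : Nat) : Int) := by push_cast; ring
    rw [hcast, ih (b + 1) _ (by omega)]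
    rw [List.drop_eq_getElem_cons hblt, List.flatMap_cons, PySem.Set.update_append]

-- A's i-loop from index b computes the candidate sequence of the remaining suffix.
theorem gpA_iloop (L : List (List Int)) (k : Nat) :
    ∀ (b : Nat) (s : PySem.Set (Int × Int)), b + k = L.length →
    (PySem.List.pyRange (b : Int) (L.length : Int) 1).foldl (fun s i =>
        (PySem.List.pyRange (i + 1) (L.length : Int) 1).foldl (fun s j =>
          (PySem.List.pyGetD L i []).foldl (fun s elem1 =>
            (PySem.List.pyGetD L j []).foldl (fun s elem2 =>
              if elem1 ≠ elem2 then
                match PySem.List.sorted [elem1, elem2] (fun z => z) false with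
                | [a, b] => PySem.Set.add s (a, b)
                | _ => s
              else s) s) s) s) s
      = PySem.Set.update s (gpSeq (L.drop b)) := by
  induction k with
  | zero =>
    intro b s hb
    rw [PySem.List.pyRange_one_eq_nil (by omega)]
    simp [List.drop_of_length_le (by omega : L.length ≤ b), gpSeq, PySem.Set.update_nil]
  | succ k ih =>
    intro b s hb
    have hblt : b < L.length := by omega
    rw [PySem.List.pyRange_one_cons (by exact_mod_cast hblt), List.foldl_cons]
    have hget : PySem.List.pyGetD L (b : Int) [] = L[b] := by
      rw [PySem.List.pyGetD_natCast, List.getD_eq_getElem L [] hblt]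
    have hcast : (b : Int) + 1 = ((b + 1 : Nat) : Int) := by push_cast; ring
    rw [hget, hcast, gpA_jloop L L[b] k (b + 1) s (by omega)]
    rw [ih (b + 1) _ (by omega)]
    rw [List.drop_eq_getElem_cons hblt]
    show _ = PySem.Set.update s (((L[b] :: L.drop (b+1)).tail.flatMap (gpCross L[b])) ++ gpSeq (L.drop (b+1)))
    rw [List.tail_cons, PySem.Set.update_append]

theorem gpA_eq (L : List (List Int)) :
    generate_pairs L = PySem.Set.ofList (gpSeq L) := by
  unfold generate_pairs
  have h0 : (0 : Int) = ((0 : Nat) : Int) := rfl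
  rw [h0, gpA_iloop L L.length 0 PySem.Set.empty (by omega), List.drop_zero,
    PySem.Set.update_empty]

theorem gpB_eq (L : List (List Int)) :
    generate_pairs_alt L = PySem.Set.ofList (gpSeq L) := by
  induction L with
  | nil => rfl
  | cons h t ih =>
    show PySem.Set.union
        (t.foldl (fun s other =>
          h.foldl (fun s x =>
            other.foldl (fun s y =>
              if x ≠ y then PySem.Set.add s (if x < y then (x, y) else (y, x)) else s) s) s)
          PySem.Set.empty)
        (generate_pairs_alt t) = _
    rw [PySem.List.foldl_congr_mem t _
        (fun s other => PySem.Set.update s (gpCross h other)) PySem.Set.empty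
        (fun s other _ => gp_cross_loop h other s)]
    rw [gp_foldl_update, ih]
    show PySem.Set.update (PySem.Set.update PySem.Set.empty (t.flatMap (gpCross h)))
        (PySem.Set.ofList (gpSeq t)) = _
    rw [gp_update_ofList, ← PySem.Set.update_append, PySem.Set.update_empty]
    rfl

-- ===== VERDICT (by name: the statement is the Claim_ definition above) =====
theorem generate_pairs_spec : Claim_equal_generate_pairs := by
  intro lists _
  unfold Spec_generate_pairs
  rw [gpA_eq, gpB_eq]
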